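-- pv_equiv track=rewrite | github.com/dariuscruceru21/FP | ex_3_seminar_5.py | verificare
-- ===== SOURCE A (Python) =====
-- def verificare(m):
--     for i in range(len(m)):
--          if i  % 2 == 0:
--              for j in range(len(m) - 1):
--                  if m[i][j] > m[i][j + 1]:
--                     return False
--          if i % 2 != 0:
--              for j in range(len(m) - 1 , 0, -1):
--                  if m[i][j] > m[i][j - 1]:
--                      return False
--
--     return True
-- ===== SOURCE B (Python) =====
-- def verificare(m):
--     for i, row in enumerate(m):
--         if i % 2 == 0:
--             if row != sorted(row):
--                 return False
--         elif row != sorted(row, reverse=True):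
--             return False
--     return True
-- ===== Notes on version B (the rewrite author's own statement) =====
-- stated objective: idiomatic
-- what changed: Replaces A's two index-juggling adjacent-pair scans (forward for even rows, backward for odd rows, both bounded by the row COUNT len(m)) with an enumerate loop that compares each whole row to its sorted (resp. reverse-sorted) copy; Pre_ excludes inputs on which A raises IndexError (a row shorter than len(m) reached before any violation).
-- intended difference: On matrices whose rows extend beyond len(m) columns, A only inspects the first len(m) elements of each row (accidental use of len(m) instead of the row length as the column bound) and returns True even when a row is unsorted past that prefix; B checks whole rows and returns False there, which is the intended behaviour. — e.g. on verificare([[1, 2, 0]]): A returns true, B returns false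
-- outside the precondition, e.g. on verificare([[1, 2, 3], [1, 2, 3], [0]]): A returns False, B returns False
import Mathlib
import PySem

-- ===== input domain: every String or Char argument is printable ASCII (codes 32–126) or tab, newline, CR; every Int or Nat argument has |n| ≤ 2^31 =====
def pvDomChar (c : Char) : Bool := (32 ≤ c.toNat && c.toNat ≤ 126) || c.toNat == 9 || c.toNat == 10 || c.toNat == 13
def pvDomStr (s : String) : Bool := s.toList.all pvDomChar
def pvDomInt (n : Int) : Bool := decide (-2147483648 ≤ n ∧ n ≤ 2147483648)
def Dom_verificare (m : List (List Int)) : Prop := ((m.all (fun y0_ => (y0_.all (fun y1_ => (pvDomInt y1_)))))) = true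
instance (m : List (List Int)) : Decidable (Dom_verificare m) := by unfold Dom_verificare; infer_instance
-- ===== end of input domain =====

-- B replaces A's two index-juggling adjacent-pair scans by an enumerate loop comparing each whole
-- row with its (reverse-)sorted copy; idiomatic; A's accidental len(m) column bound is stated as D_.

-- ===== PORT A =====
-- m[i][j]; the .getD defaults are only reached where Python raises IndexError, which Pre_ excludes.
def pvCell (m : List (List Int)) (i j : Int) : Int :=
  PySem.List.pyGetD (PySem.List.pyGetD m i []) j 0

def verificare (m : List (List Int)) : Bool :=
  -- 'for i in range(len(m)): … return False … ; return True' as ¬(some row triggers return False)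
  !((PySem.List.pyRange 0 (m.length : Int) 1).any (fun i =>
      (if i % 2 == 0 then
        (PySem.List.pyRange 0 ((m.length : Int) - 1) 1).any (fun j =>
          decide (pvCell m i j > pvCell m i (j + 1)))
      else false)
      ||
      (if i % 2 != 0 then
        (PySem.List.pyRange ((m.length : Int) - 1) 0 (-1)).any (fun j =>
          decide (pvCell m i j > pvCell m i (j - 1)))
      else false)))

-- ===== PORT B =====
def verificare_alt (m : List (List Int)) : Bool :=
  !((PySem.List.enumerate m).any (fun ir =>
      if ir.1 % 2 == 0 then !(ir.2 == PySem.List.sorted ir.2 id false)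
      else !(ir.2 == PySem.List.sorted ir.2 id true)))

-- ===== PRECONDITION & SPEC =====
-- Pre_ excludes the inputs on which A raises IndexError (a row shorter than the row count,
-- reached before any violation); to stay closed-form it conservatively also excludes some
-- crash-free inputs where only a violation in an EARLIER row preempts the short row — on those
-- A returns False and B returns False as well.
def Pre_verificare (m : List (List Int)) : Prop :=
  (∀ row ∈ m, m.length ≤ row.length) ∨
  (m ≠ [] ∧ ¬ (m.headI.take m.length).IsChain (· ≤ ·))
instance (m : List (List Int)) : Decidable (Pre_verificare m) := by
  unfold Pre_verificare; infer_instance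

def pvWitness_verificare : List (List Int) := [[1, 2], [2, 1]]

-- On matrices whose rows extend beyond len(m) columns, A only inspects the first len(m) elements
-- of each row (accidental use of len(m) instead of the row length as the column bound) and returns
-- True even when a row is unsorted past that prefix; B checks whole rows and returns False there,
-- which is the intended behaviour.
def D_verificare (m : List (List Int)) : Prop :=
  (∀ row ∈ m, m.length ≤ row.length) ∧
  (∀ i : Nat, i < m.length →
      (i % 2 = 0 → ((m.getD i []).take m.length).IsChain (· ≤ ·)) ∧
      (i % 2 ≠ 0 → ((m.getD i []).take m.length).IsChain (fun a b => b ≤ a))) ∧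
  ¬ (∀ i : Nat, i < m.length →
      (i % 2 = 0 → (m.getD i []).IsChain (· ≤ ·)) ∧
      (i % 2 ≠ 0 → (m.getD i []).IsChain (fun a b => b ≤ a)))
instance (m : List (List Int)) : Decidable (D_verificare m) := by
  unfold D_verificare; infer_instance

def Spec_verificare (m : List (List Int)) (out : Bool) : Prop := ¬ D_verificare m → out = verificare_alt m
instance (m : List (List Int)) (out : Bool) : Decidable (Spec_verificare m out) := by unfold Spec_verificare; infer_instance

def pvDiffWitness_verificare : List (List Int) := [[1, 2, 0]]
def pvDiffWitnessOut_verificare : Bool × Bool := (true, false)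

-- ===== CLAIM (what is proved, stated in full; the proofs are below) =====
def Claim_unchanged_verificare : Prop := ∀ (m : List (List Int)), Dom_verificare m → Pre_verificare m → Spec_verificare m (verificare m)
def Claim_changed_verificare : Prop := Dom_verificare (pvDiffWitness_verificare) ∧ Pre_verificare (pvDiffWitness_verificare) ∧ D_verificare (pvDiffWitness_verificare) ∧ verificare (pvDiffWitness_verificare) = pvDiffWitnessOut_verificare.1 ∧ verificare_alt (pvDiffWitness_verificare) = pvDiffWitnessOut_verificare.2 ∧ pvDiffWitnessOut_verificare.1 ≠ pvDiffWitnessOut_verificare.2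
def Claim_exact_verificare : Prop := ∀ (m : List (List Int)), Dom_verificare m → Pre_verificare m → D_verificare m → verificare m ≠ verificare_alt m

-- ===== LEMMAS AND PROOFS =====

-- the per-row condition both programs test (on the full row for B, on the len(m)-prefix for A)
def pvOK (i : Nat) (r : List Int) : Prop :=
  (i % 2 = 0 → r.IsChain (· ≤ ·)) ∧ (i % 2 ≠ 0 → r.IsChain (fun a b => b ≤ a))

theorem pv_sorted_eq_iff (p : List Int) :
    PySem.List.sorted p id = p ↔ p.IsChain (· ≤ ·) := by
  constructor
  · intro he
    rw [List.isChain_iff_pairwise]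
    have := PySem.List.sorted_pairwise p id
    rw [he] at this
    simpa using this
  · intro hc
    exact PySem.List.sorted_eq_self_of_pairwise p id (by simpa using List.isChain_iff_pairwise.mp hc)

theorem pv_sorted_rev_eq_iff (p : List Int) :
    PySem.List.sorted p id true = p ↔ p.IsChain (fun a b => b ≤ a) := by
  have tr : Trans (fun a b : Int => b ≤ a) (fun a b : Int => b ≤ a) (fun a b : Int => b ≤ a) :=
    ⟨fun h1 h2 => le_trans h2 h1⟩
  constructor
  · intro he
    rw [@List.isChain_iff_pairwise _ _ _ tr]
    have := PySem.List.sorted_pairwise_rev p id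
    rw [he] at this
    simpa using this
  · intro hc
    exact PySem.List.sorted_rev_eq_self_of_pairwise p id
      (by simpa using (@List.isChain_iff_pairwise _ _ _ tr).mp hc)

theorem pv_isChain_take {R : Int → Int → Prop} (r : List Int) (n : Nat)
    (h : r.IsChain R) : (r.take n).IsChain R := by
  rw [List.isChain_iff_getElem] at h ⊢
  intro k hk
  have hlen : (r.take n).length ≤ r.length := by simp [List.length_take]
  have e1 : (r.take n)[k]'(by omega) = r[k]'(by omega) := List.getElem_take
  have e2 : (r.take n)[k + 1]'(by omega) = r[k + 1]'(by omega) := List.getElem_take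
  rw [e1, e2]
  exact h k (by omega)

theorem pv_ok_of_take {i : Nat} {r : List Int} {n : Nat} (h : pvOK i r) : pvOK i (r.take n) :=
  ⟨fun hp => pv_isChain_take r n (h.1 hp), fun hp => pv_isChain_take r n (h.2 hp)⟩

-- the chain condition as an adjacent-pair condition on r itself (prefix of length n, n ≤ |r|)
theorem pv_not_chain_le_iff (n : Nat) (r : List Int) (h : n ≤ r.length) :
    ¬ (r.take n).IsChain (· ≤ ·) ↔ ∃ k : Nat, k + 1 < n ∧
      r.getD (k + 1) 0 < r.getD k 0 := by
  rw [List.isChain_iff_getElem]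
  push_neg
  constructor
  · rintro ⟨k, hk, hlt⟩
    have hlen : (r.take n).length = n := by simp [List.length_take, Nat.min_eq_left h]
    refine ⟨k, by omega, ?_⟩
    have h1 : k + 1 < r.length := by omega
    have h0 : k < r.length := by omega
    have e1 : (r.take n)[k]'(by omega) = r[k] := List.getElem_take
    have e2 : (r.take n)[k + 1]'(by omega) = r[k + 1] := List.getElem_take
    rw [hlen] at hk
    simp only [List.getD_eq_getElem?_getD, List.getElem?_eq_getElem h1, List.getElem?_eq_getElem h0]
    simp only [Option.getD_some]
    rw [e1, e2] at hlt
    omega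
  · rintro ⟨k, hk, hlt⟩
    have hlen : (r.take n).length = n := by simp [List.length_take, Nat.min_eq_left h]
    have h1 : k + 1 < r.length := by omega
    have h0 : k < r.length := by omega
    refine ⟨k, by omega, ?_⟩
    have e1 : (r.take n)[k]'(by omega) = r[k] := List.getElem_take
    have e2 : (r.take n)[k + 1]'(by omega) = r[k + 1] := List.getElem_take
    rw [e1, e2]
    simp only [List.getD_eq_getElem?_getD, List.getElem?_eq_getElem h1, List.getElem?_eq_getElem h0,
      Option.getD_some] at hlt
    omega

theorem pv_not_chain_ge_iff (n : Nat) (r : List Int) (h : n ≤ r.length) :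
    ¬ (r.take n).IsChain (fun a b => b ≤ a) ↔ ∃ k : Nat, k + 1 < n ∧
      r.getD k 0 < r.getD (k + 1) 0 := by
  rw [List.isChain_iff_getElem]
  push_neg
  constructor
  · rintro ⟨k, hk, hlt⟩
    have hlen : (r.take n).length = n := by simp [List.length_take, Nat.min_eq_left h]
    rw [hlen] at hk
    have h1 : k + 1 < r.length := by omega
    have h0 : k < r.length := by omega
    refine ⟨k, by omega, ?_⟩
    have e1 : (r.take n)[k]'(by omega) = r[k] := List.getElem_take
    have e2 : (r.take n)[k + 1]'(by omega) = r[k + 1] := List.getElem_take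
    rw [e1, e2] at hlt
    simp only [List.getD_eq_getElem?_getD, List.getElem?_eq_getElem h1, List.getElem?_eq_getElem h0,
      Option.getD_some]
    omega
  · rintro ⟨k, hk, hlt⟩
    have hlen : (r.take n).length = n := by simp [List.length_take, Nat.min_eq_left h]
    have h1 : k + 1 < r.length := by omega
    have h0 : k < r.length := by omega
    refine ⟨k, by omega, ?_⟩
    have e1 : (r.take n)[k]'(by omega) = r[k] := List.getElem_take
    have e2 : (r.take n)[k + 1]'(by omega) = r[k + 1] := List.getElem_take
    rw [e1, e2]
    simp only [List.getD_eq_getElem?_getD, List.getElem?_eq_getElem h1, List.getElem?_eq_getElem h0,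
      Option.getD_some] at hlt
    omega

-- A's even-row scan, for a row long enough (n ≤ |r|)
theorem pv_evenA_iff (n : Nat) (r : List Int) (h : n ≤ r.length) :
    ((PySem.List.pyRange 0 ((n : Int) - 1) 1).any (fun j =>
        decide (PySem.List.pyGetD r j 0 > PySem.List.pyGetD r (j + 1) 0)) = true)
      ↔ ¬ (r.take n).IsChain (· ≤ ·) := by
  rw [pv_not_chain_le_iff n r h]
  simp only [List.any_eq_true, PySem.List.mem_pyRange_one, decide_eq_true_eq]
  constructor
  · rintro ⟨j, ⟨h0, h1⟩, hgt⟩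
    refine ⟨j.toNat, by omega, ?_⟩
    rw [PySem.List.pyGetD_of_nonneg r 0 h0, PySem.List.pyGetD_of_nonneg r 0 (by omega)] at hgt
    have : (j + 1).toNat = j.toNat + 1 := by omega
    rw [this] at hgt
    omega
  · rintro ⟨k, hk, hlt⟩
    refine ⟨(k : Int), ⟨by omega, by omega⟩, ?_⟩
    rw [PySem.List.pyGetD_of_nonneg r 0 (by omega), PySem.List.pyGetD_of_nonneg r 0 (by omega)]
    have e0 : ((k : Int)).toNat = k := by omega
    have e1 : ((k : Int) + 1).toNat = k + 1 := by omega
    rw [e0, e1]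
    omega

-- A's odd-row scan (runs j = n-1 … 1 checking r[j] > r[j-1]), for a row long enough
theorem pv_oddA_iff (n : Nat) (r : List Int) (h : n ≤ r.length) :
    ((PySem.List.pyRange ((n : Int) - 1) 0 (-1)).any (fun j =>
        decide (PySem.List.pyGetD r j 0 > PySem.List.pyGetD r (j - 1) 0)) = true)
      ↔ ¬ (r.take n).IsChain (fun a b => b ≤ a) := by
  rw [pv_not_chain_ge_iff n r h]
  simp only [List.any_eq_true, PySem.List.mem_pyRange_neg_one, decide_eq_true_eq]
  constructor
  · rintro ⟨j, ⟨h0, h1⟩, hgt⟩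
    refine ⟨j.toNat - 1, by omega, ?_⟩
    rw [PySem.List.pyGetD_of_nonneg r 0 (by omega), PySem.List.pyGetD_of_nonneg r 0 (by omega)] at hgt
    have e0 : (j - 1).toNat = j.toNat - 1 := by omega
    rw [e0] at hgt
    have e2 : j.toNat - 1 + 1 = j.toNat := by omega
    rw [e2]
    omega
  · rintro ⟨k, hk, hlt⟩
    refine ⟨(k : Int) + 1, ⟨by omega, by omega⟩, ?_⟩
    rw [PySem.List.pyGetD_of_nonneg r 0 (by omega), PySem.List.pyGetD_of_nonneg r 0 (by omega)]
    have e0 : ((k : Int) + 1).toNat = k + 1 := by omega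
    have e1 : ((k : Int) + 1 - 1).toNat = k := by omega
    rw [e0, e1]
    omega

-- A's even-row scan fires whenever the n-prefix has a descent, for ANY row length
theorem pv_evenA_of_not_chain (n : Nat) (r : List Int)
    (hnot : ¬ (r.take n).IsChain (· ≤ ·)) :
    ((PySem.List.pyRange 0 ((n : Int) - 1) 1).any (fun j =>
        decide (PySem.List.pyGetD r j 0 > PySem.List.pyGetD r (j + 1) 0)) = true) := by
  rw [List.isChain_iff_getElem] at hnot
  push_neg at hnot
  obtain ⟨k, hk, hlt⟩ := hnot
  have hlen : (r.take n).length ≤ min n r.length := by simp [List.length_take]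
  have hkn : k + 1 < n := by omega
  have hkr : k + 1 < r.length := by omega
  simp only [List.any_eq_true, PySem.List.mem_pyRange_one, decide_eq_true_eq]
  refine ⟨(k : Int), ⟨by omega, by omega⟩, ?_⟩
  rw [PySem.List.pyGetD_of_nonneg r 0 (by omega), PySem.List.pyGetD_of_nonneg r 0 (by omega)]
  have e0 : ((k : Int)).toNat = k := by omega
  have e1 : ((k : Int) + 1).toNat = k + 1 := by omega
  rw [e0, e1]
  have e2 : (r.take n)[k]'(by omega) = r[k]'(by omega) := List.getElem_take
  have e3 : (r.take n)[k + 1]'(by omega) = r[k + 1]'(by omega) := List.getElem_take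
  rw [e2, e3] at hlt
  simp only [List.getD_eq_getElem?_getD, List.getElem?_eq_getElem hkr,
    List.getElem?_eq_getElem (by omega : k < r.length), Option.getD_some]
  omega

-- B returns True exactly when every row (whole row) is sorted the right way for its parity
theorem pv_B_true_iff (m : List (List Int)) :
    verificare_alt m = true ↔ ∀ i : Nat, i < m.length → pvOK i (m.getD i []) := by
  unfold verificare_alt
  rw [Bool.not_eq_eq_eq_not, Bool.not_true, List.any_eq_false]
  constructor
  · intro h i hi
    have hmem : ((i : Int), m[i]) ∈ PySem.List.enumerate m := by
      rw [PySem.List.mem_enumerate_iff]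
      exact ⟨i, hi, by simp⟩
    have := h _ hmem
    have hgd : m.getD i [] = m[i] := List.getD_eq_getElem m [] hi
    rw [hgd]
    by_cases hp : i % 2 = 0
    · have hb : ((i : Int) % 2 == 0) = true := by simp; omega
      simp only [hb, reduceIte, Bool.not_eq_eq_eq_not, Bool.not_true, beq_eq_false_iff_ne, ne_eq] at this
      exact ⟨fun _ => (pv_sorted_eq_iff _).mp (not_not.mp this).symm, fun hc => absurd hp hc⟩
    · have hb : ((i : Int) % 2 == 0) = false := by simp; omega
      simp only [hb, Bool.false_eq_true, reduceIte, Bool.not_eq_eq_eq_not, Bool.not_true, beq_eq_false_iff_ne, ne_eq] at this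
      exact ⟨fun hc => absurd hc hp, fun _ => (pv_sorted_rev_eq_iff _).mp (not_not.mp this).symm⟩
  · intro h p hp
    rw [PySem.List.mem_enumerate_iff] at hp
    obtain ⟨k, hk, rfl⟩ := hp
    have hok := h k hk
    have hgd : m.getD k [] = m[k] := List.getD_eq_getElem m [] hk
    rw [hgd] at hok
    by_cases hpar : k % 2 = 0
    · have hb : (((0 : Int) + (k : Int)) % 2 == 0) = true := by simp; omega
      simp only [hb, reduceIte, Bool.not_eq_eq_eq_not, Bool.not_true, beq_eq_false_iff_ne, ne_eq]
      exact not_not.mpr ((pv_sorted_eq_iff _).mpr (hok.1 hpar)).symm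
    · have hb : (((0 : Int) + (k : Int)) % 2 == 0) = false := by simp; omega
      simp only [hb, Bool.false_eq_true, reduceIte, Bool.not_eq_eq_eq_not, Bool.not_true, beq_eq_false_iff_ne, ne_eq]
      exact not_not.mpr ((pv_sorted_rev_eq_iff _).mpr (hok.2 hpar)).symm

-- A returns True exactly when every row's len(m)-prefix is sorted the right way (rows long enough)
theorem pv_A_true_iff (m : List (List Int)) (hall : ∀ row ∈ m, m.length ≤ row.length) :
    verificare m = true ↔ ∀ i : Nat, i < m.length → pvOK i ((m.getD i []).take m.length) := by
  unfold verificare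
  rw [Bool.not_eq_eq_eq_not, Bool.not_true, List.any_eq_false]
  constructor
  · intro h i hi
    have hmem : (i : Int) ∈ PySem.List.pyRange 0 (m.length : Int) 1 := by
      rw [PySem.List.mem_pyRange_one]; omega
    have hbody := h _ hmem
    rw [Bool.not_eq_true, Bool.or_eq_false_iff] at hbody
    have hrow : PySem.List.pyGetD m (i : Int) [] = m[i] :=
      PySem.List.pyGetD_eq_getElem m [] (by omega) (by omega)
    have hgd : m.getD i [] = m[i] := List.getD_eq_getElem m [] hi
    rw [hgd]
    have hlen : m.length ≤ (m[i]'hi).length := hall _ (List.getElem_mem hi)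
    by_cases hp : i % 2 = 0
    · have hb : ((i : Int) % 2 == 0) = true := by simp; omega
      have h1 := hbody.1
      simp only [hb, reduceIte] at h1
      refine ⟨fun _ => ?_, fun hc => absurd hp hc⟩
      by_contra hno
      have := (pv_evenA_iff m.length (m[i]) hlen).mpr hno
      simp only [pvCell, hrow] at h1
      rw [h1] at this
      exact Bool.false_ne_true this
    · have hb : ((i : Int) % 2 == 0) = false := by simp; omega
      have h2 := hbody.2
      simp only [bne, hb, Bool.not_false, reduceIte] at h2
      refine ⟨fun hc => absurd hc hp, fun _ => ?_⟩
      by_contra hno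
      have := (pv_oddA_iff m.length (m[i]) hlen).mpr hno
      simp only [pvCell, hrow] at h2
      rw [h2] at this
      exact Bool.false_ne_true this
  · intro h i hi
    rw [PySem.List.mem_pyRange_one] at hi
    obtain ⟨h0, h1⟩ := hi
    have hik : i.toNat < m.length := by omega
    have hok := h i.toNat hik
    have hrow : PySem.List.pyGetD m i [] = m[i.toNat] :=
      PySem.List.pyGetD_eq_getElem m [] h0 (by omega)
    have hgd : m.getD i.toNat [] = m[i.toNat] := List.getD_eq_getElem m [] hik
    rw [hgd] at hok
    have hlen : m.length ≤ (m[i.toNat]'hik).length := hall _ (List.getElem_mem hik)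
    rw [Bool.not_eq_true, Bool.or_eq_false_iff]
    by_cases hp : i % 2 = 0
    · have hb : (i % 2 == 0) = true := by simp; omega
      have hnp : i.toNat % 2 = 0 := by omega
      constructor
      · simp only [hb, reduceIte]
        simp only [pvCell, hrow]
        rw [← Bool.not_eq_true, pv_evenA_iff m.length (m[i.toNat]) hlen]
        exact fun hc => hc (hok.1 hnp)
      · simp [bne, hb]
    · have hb : (i % 2 == 0) = false := by simp; omega
      have hnp : i.toNat % 2 ≠ 0 := by omega
      constructor
      · simp [hb]
      · simp only [bne, hb, Bool.not_false, reduceIte]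
        simp only [pvCell, hrow]
        rw [← Bool.not_eq_true, pv_oddA_iff m.length (m[i.toNat]) hlen]
        exact fun hc => hc (hok.2 hnp)

-- A returns False when the first row's len(m)-prefix has a descent (any row lengths)
theorem pv_A_false_first (r : List Int) (t : List (List Int))
    (hnot : ¬ (r.take (r :: t).length).IsChain (· ≤ ·)) :
    verificare (r :: t) = false := by
  unfold verificare
  rw [Bool.not_eq_eq_eq_not, Bool.not_false, List.any_eq_true]
  have hN : (0 : Int) < (((r :: t).length : Int)) := by exact_mod_cast Nat.succ_pos t.length
  refine ⟨0, by rw [PySem.List.mem_pyRange_one]; exact ⟨le_rfl, hN⟩, ?_⟩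
  have hrow0 : PySem.List.pyGetD (r :: t) 0 [] = r := by
    rw [PySem.List.pyGetD_eq_getElem (r :: t) [] le_rfl (by exact_mod_cast Nat.succ_pos t.length)]
    rfl
  have hA0 := pv_evenA_of_not_chain (r :: t).length r hnot
  simp only [pvCell, hrow0]
  simpa using hA0

-- B returns False when the first row has a descent in its len(m)-prefix
theorem pv_B_false_first (r : List Int) (t : List (List Int))
    (hnot : ¬ (r.take (r :: t).length).IsChain (· ≤ ·)) :
    verificare_alt (r :: t) = false := by
  rw [← Bool.not_eq_true, pv_B_true_iff]
  intro hall
  have h0 := hall 0 (Nat.succ_pos t.length)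
  have : r.IsChain (· ≤ ·) := by simpa using h0.1 rfl
  exact hnot (pv_isChain_take r _ this)

-- inside D_: A = true, B = false
theorem pv_D_values (m : List (List Int)) (hd : D_verificare m) :
    verificare m = true ∧ verificare_alt m = false := by
  obtain ⟨hall, hpref, hfull⟩ := hd
  refine ⟨(pv_A_true_iff m hall).mpr (fun i hi => hpref i hi), ?_⟩
  rw [← Bool.not_eq_true, pv_B_true_iff]
  exact hfull

-- ===== VERDICT (by name: the statement is the Claim_ definition above) =====
theorem verificare_spec : Claim_unchanged_verificare := by
  intro m _hdom hpre
  unfold Spec_verificare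
  intro hnd
  rcases hpre with hall | ⟨hne, hnot⟩
  · by_cases hpref : ∀ i : Nat, i < m.length → pvOK i ((m.getD i []).take m.length)
    · have hA : verificare m = true := (pv_A_true_iff m hall).mpr hpref
      have hfull : ∀ i : Nat, i < m.length → pvOK i (m.getD i []) := by
        by_contra hno
        exact hnd ⟨hall, fun i hi => hpref i hi, hno⟩
      rw [hA, ((pv_B_true_iff m).mpr hfull)]
    · have hA : verificare m = false := by
        rw [← Bool.not_eq_true]; exact fun h => hpref ((pv_A_true_iff m hall).mp h)
      have hB : verificare_alt m = false := by
        rw [← Bool.not_eq_true, pv_B_true_iff]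
        intro hfull
        exact hpref (fun i hi => pv_ok_of_take (hfull i hi))
      rw [hA, hB]
  · obtain ⟨r, t, rfl⟩ : ∃ r t, m = r :: t := by
      cases m with
      | nil => exact absurd rfl hne
      | cons r t => exact ⟨r, t, rfl⟩
    have hd : ¬ (r.take (r :: t).length).IsChain (· ≤ ·) := by simpa [List.headI] using hnot
    rw [pv_A_false_first r t hd, pv_B_false_first r t hd]

theorem verificare_changed : Claim_changed_verificare := by
  unfold Claim_changed_verificare; decide

theorem verificare_tight : Claim_exact_verificare := by
  intro m _hdom _hpre hd
  obtain ⟨hA, hB⟩ := pv_D_values m hd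
  rw [hA, hB]
  decide
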